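-- pv_equiv track=rewrite | github.com/TorbenMannhart/codewars_katas | direction_reduction.py | dirReduc
-- ===== SOURCE A (Python) =====
-- def dirReduc(plan):
--     opposite = {'NORTH': 'SOUTH', 'EAST': 'WEST', 'SOUTH': 'NORTH', 'WEST': 'EAST'}
--     new_plan = ['dummy']
--     for d in plan:
--         if new_plan[-1] == opposite[d]:
--             new_plan.pop()
--         else:
--             new_plan.append(d)
--     return new_plan[1:] # remove dummy
-- ===== SOURCE B (Python) =====
-- def dirReduc(plan):
--     opposite = {'NORTH': 'SOUTH', 'EAST': 'WEST', 'SOUTH': 'NORTH', 'WEST': 'EAST'}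
--     cur = list(plan)
--     opp = [opposite[d] for d in plan]  # per-token opposite, looked up once (KeyError on an unknown token, as in A)
--     while True:
--         for i in range(len(cur) - 1):
--             if opp[i] == cur[i + 1]:
--                 del cur[i:i + 2]
--                 del opp[i:i + 2]
--                 break
--         else:
--             return cur
-- ===== Notes on version B (the rewrite author's own statement) =====
-- stated objective: alternative
-- what changed: Replaced the one-pass stack (append/pop against a dummy sentinel) by repeated fixed-point scanning over the list with a precomputed per-token opposite array: find the first adjacent cancelling pair, delete it, and rescan until no pair cancels.
import Mathlib
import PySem

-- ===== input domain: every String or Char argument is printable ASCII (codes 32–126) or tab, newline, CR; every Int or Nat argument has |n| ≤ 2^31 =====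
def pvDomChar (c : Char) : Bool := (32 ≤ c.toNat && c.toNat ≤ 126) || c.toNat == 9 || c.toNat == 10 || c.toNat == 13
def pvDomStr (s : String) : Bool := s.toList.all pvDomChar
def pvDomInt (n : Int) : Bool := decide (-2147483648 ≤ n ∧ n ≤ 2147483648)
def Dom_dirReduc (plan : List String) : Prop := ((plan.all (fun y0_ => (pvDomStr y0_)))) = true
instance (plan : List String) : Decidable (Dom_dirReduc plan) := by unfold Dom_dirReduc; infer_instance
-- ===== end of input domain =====

-- B replaces A's one-pass stack by repeated removal of the first adjacent opposite pair until a
-- fixed point is reached (alternative decomposition, not faster).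

-- the literal dict 'opposite' shared by both sources
def pvOpp : PySem.Dict String String :=
  PySem.Dict.ofList [("NORTH", "SOUTH"), ("EAST", "WEST"), ("SOUTH", "NORTH"), ("WEST", "EAST")]

-- ===== PORT A =====
-- 'opposite[d]' raises KeyError for a token outside the dict; those inputs are excluded by
-- Pre_dirReduc, so the port reads the lookup with default "" (the default is never hit inside Pre_).
def dirReduc (plan : List String) : List String :=
  PySem.List.slice
    (plan.foldl
      (fun new_plan d =>
        if PySem.List.pyGet? new_plan (-1) = some (pvOpp.getD d "") then new_plan.dropLast
        else new_plan ++ [d])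
      ["dummy"])
    (some 1) none

-- ===== PORT B =====
-- Source B keeps 'cur' and the parallel list 'opp' of precomputed opposites.
-- one inner 'for' pass of Source B: find the first adjacent cancelling pair (opp[i] == cur[i+1])
-- and delete it from both lists (none = no pair)
def pvRemoveFirst : List String → List String → Option (List String × List String)
  | a :: b :: cs, p :: q :: ps =>
      if p = b then some (cs, ps)
      else (pvRemoveFirst (b :: cs) (q :: ps)).map (fun r => (a :: r.1, p :: r.2))
  | _, _ => none

theorem pvRemoveFirst_length : ∀ (l o c co : List String),
    pvRemoveFirst l o = some (c, co) → c.length < l.length := by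
  intro l
  induction l with
  | nil => intro o c co h; cases o <;> simp [pvRemoveFirst] at h
  | cons a rest ih =>
      intro o c co h
      match rest, o, h with
      | _, [], h => simp [pvRemoveFirst] at h
      | [], p :: o', h => simp [pvRemoveFirst] at h
      | b :: rest', p :: o', h =>
          match o', h with
          | [], h => simp [pvRemoveFirst] at h
          | q :: o'', h =>
              simp only [pvRemoveFirst] at h
              split at h
              · cases h; simp
              · rcases Option.map_eq_some_iff.mp h with ⟨⟨c', co'⟩, hc', heq⟩
                cases heq
                have := ih (q :: o'') c' co' hc'
                simpa using Nat.succ_lt_succ this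

-- the outer 'while True' loop of Source B: repeat until no adjacent pair cancels
def pvLoop (cur opp : List String) : List String :=
  match h : pvRemoveFirst cur opp with
  | some co => pvLoop co.1 co.2
  | none => cur
termination_by cur.length
decreasing_by exact pvRemoveFirst_length _ _ _ _ h

-- 'opposite[d]' in the comprehension raises KeyError for a token outside the dict; those inputs
-- are excluded by Pre_dirReduc, so the port reads the lookup with default "" (never hit inside Pre_).
def dirReduc_alt (plan : List String) : List String :=
  pvLoop plan (plan.map (fun d => pvOpp.getD d ""))

-- ===== PRECONDITION & SPEC =====
-- Pre_ excludes exactly the plans containing a token outside the dict, on which A raises KeyError.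
def Pre_dirReduc (plan : List String) : Prop :=
  ∀ d ∈ plan, d ∈ (["NORTH", "SOUTH", "EAST", "WEST"] : List String)
instance (plan : List String) : Decidable (Pre_dirReduc plan) := by unfold Pre_dirReduc; infer_instance

def pvWitness_dirReduc : List String := ["NORTH", "SOUTH", "SOUTH", "EAST", "WEST", "NORTH", "WEST"]

def Spec_dirReduc (plan : List String) (out : List String) : Prop := out = dirReduc_alt plan
instance (plan : List String) (out : List String) : Decidable (Spec_dirReduc plan out) := by unfold Spec_dirReduc; infer_instance

-- ===== CLAIM (what is proved, stated in full; the proofs are below) =====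
def Claim_equal_dirReduc : Prop := ∀ (plan : List String), Dom_dirReduc plan → Pre_dirReduc plan → Spec_dirReduc plan (dirReduc plan)

-- ===== LEMMAS AND PROOFS =====

-- proof-side single-list versions of B's scan (condition phrased via get?)
def pvRF : List String → Option (List String)
  | a :: b :: rest =>
      if pvOpp.get? a = some b then some rest
      else (pvRF (b :: rest)).map (a :: ·)
  | _ => none

theorem pvRF_length : ∀ (l c : List String), pvRF l = some c → c.length < l.length := by
  intro l
  induction l with
  | nil => intro c h; simp [pvRF] at h
  | cons a rest ih =>
      intro c h
      match rest, h with
      | [], h => simp [pvRF] at h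
      | b :: rest', h =>
          simp only [pvRF] at h
          split at h
          · cases h; simp
          · rcases Option.map_eq_some_iff.mp h with ⟨c', hc', rfl⟩
            have := ih c' hc'
            simpa using Nat.succ_lt_succ this

def pvFix (l : List String) : List String :=
  match h : pvRF l with
  | some c => pvFix c
  | none => l
termination_by l.length
decreasing_by exact pvRF_length _ _ h

-- the stack step of A, with the stack reversed (head = top of stack)
def pvStep (s : List String) (d : String) : List String :=
  if s.head? = some (pvOpp.getD d "") then s.tail else d :: s

theorem pvOpp_mk : pvOpp = PySem.Dict.mk [("NORTH", "SOUTH"), ("EAST", "WEST"), ("SOUTH", "NORTH"), ("WEST", "EAST")] := by decide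

theorem pvOpp_get?_char (a b : String) (h : pvOpp.get? a = some b) :
    (a = "NORTH" ∧ b = "SOUTH") ∨ (a = "EAST" ∧ b = "WEST") ∨
    (a = "SOUTH" ∧ b = "NORTH") ∨ (a = "WEST" ∧ b = "EAST") := by
  rw [pvOpp_mk] at h
  simp only [PySem.Dict.get?_mk_cons] at h
  split_ifs at h with h1 h2 h3 h4
  · exact Or.inl ⟨(beq_iff_eq.mp h1).symm, (Option.some_inj.mp h).symm⟩
  · exact Or.inr (Or.inl ⟨(beq_iff_eq.mp h2).symm, (Option.some_inj.mp h).symm⟩)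
  · exact Or.inr (Or.inr (Or.inl ⟨(beq_iff_eq.mp h3).symm, (Option.some_inj.mp h).symm⟩))
  · exact Or.inr (Or.inr (Or.inr ⟨(beq_iff_eq.mp h4).symm, (Option.some_inj.mp h).symm⟩))
  · simp [PySem.Dict.get?] at h

theorem pvOpp_invol (a b : String) (h : pvOpp.get? a = some b) : pvOpp.get? b = some a := by
  rcases pvOpp_get?_char a b h with ⟨rfl, rfl⟩ | ⟨rfl, rfl⟩ | ⟨rfl, rfl⟩ | ⟨rfl, rfl⟩ <;> decide

theorem pvOpp_valid (d : String) (hd : d ∈ (["NORTH", "SOUTH", "EAST", "WEST"] : List String)) :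
    pvOpp.get? d = some (pvOpp.getD d "") := by
  simp only [List.mem_cons, List.not_mem_nil, or_false] at hd
  rcases hd with rfl | rfl | rfl | rfl <;> decide

theorem pvOpp_getD (a b : String) (h : pvOpp.get? a = some b) : pvOpp.getD a "" = b := by
  rcases pvOpp_get?_char a b h with ⟨rfl, rfl⟩ | ⟨rfl, rfl⟩ | ⟨rfl, rfl⟩ | ⟨rfl, rfl⟩ <;> decide

-- bridge: A's fold on new_plan equals the reversed-stack fold
theorem pvBridge (l : List String) (np : List String) :
    l.foldl (fun new_plan d =>
        if PySem.List.pyGet? new_plan (-1) = some (pvOpp.getD d "") then new_plan.dropLast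
        else new_plan ++ [d]) np
      = (l.foldl pvStep np.reverse).reverse := by
  induction l generalizing np with
  | nil => simp
  | cons d rest ih =>
      have hstep : (if PySem.List.pyGet? np (-1) = some (pvOpp.getD d "") then np.dropLast
          else np ++ [d]).reverse = pvStep np.reverse d := by
        unfold pvStep
        rw [PySem.List.pyGet?_neg_one, ← List.head?_reverse]
        split
        · rw [List.tail_reverse]
        · simp
      simp only [List.foldl_cons]
      rw [ih, ← hstep]

def pvInv (s : List String) : Prop := s.IsChain (fun y x => pvOpp.get? x ≠ some y)
def pvIrred (l : List String) : Prop := l.IsChain (fun a b => pvOpp.get? a ≠ some b)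

theorem pvStep_inv (s : List String) (d : String) (hs : pvInv s)
    (hd : d ∈ (["NORTH", "SOUTH", "EAST", "WEST"] : List String)) : pvInv (pvStep s d) := by
  unfold pvStep
  split
  · exact List.IsChain.tail hs
  · rename_i hne
    cases s with
    | nil => exact List.isChain_singleton _
    | cons t s' =>
        refine List.isChain_cons_cons.mpr ⟨?_, hs⟩
        intro hc
        have h2 := pvOpp_invol t d hc
        have h3 := pvOpp_valid d hd
        rw [h3] at h2
        exact hne (by simp [Option.some_inj.mp h2])

theorem pvInv_preserved (x : List String) (s : List String)
    (hs : pvInv s) (hx : ∀ d ∈ x, d ∈ (["NORTH", "SOUTH", "EAST", "WEST"] : List String)) :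
    pvInv (x.foldl pvStep s) := by
  induction x generalizing s with
  | nil => exact hs
  | cons d rest ih =>
      simp only [List.foldl_cons]
      exact ih (pvStep s d) (pvStep_inv s d hs (hx d (by simp))) (fun e he => hx e (by simp [he]))

theorem pvCancel (y : List String) (s : List String) (a b : String)
    (hs : pvInv s) (hab : pvOpp.get? a = some b) :
    (a :: b :: y).foldl pvStep s = y.foldl pvStep s := by
  have hgdA : pvOpp.getD a "" = b := pvOpp_getD a b hab
  have hba : pvOpp.get? b = some a := pvOpp_invol a b hab
  have hgdB : pvOpp.getD b "" = a := pvOpp_getD b a hba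
  simp only [List.foldl_cons]
  by_cases h1 : s.head? = some b
  · cases s with
    | nil => simp at h1
    | cons t s'' =>
        have ht : t = b := by simpa using h1
        have hstep1 : pvStep (t :: s'') a = s'' := by
          unfold pvStep; rw [hgdA, if_pos h1]; rfl
        rw [hstep1]
        have hstep2 : pvStep s'' b = b :: s'' := by
          unfold pvStep; rw [hgdB]
          split
          · rename_i h2
            cases s'' with
            | nil => simp at h2
            | cons u s3 =>
                have hu : u = a := by simpa using h2
                exfalso
                have hrel := List.rel_of_isChain_cons_cons hs
                rw [ht, hu] at hrel
                exact hrel hab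
          · rfl
        rw [hstep2, ht]
  · have hstep1 : pvStep s a = a :: s := by
      unfold pvStep; rw [hgdA, if_neg h1]
    rw [hstep1]
    have hstep2 : pvStep (a :: s) b = s := by
      unfold pvStep; rw [hgdB]; simp
    rw [hstep2]

theorem pvIrredRun (l : List String) (s : List String)
    (hirr : pvIrred l)
    (hl : ∀ d ∈ l, d ∈ (["NORTH", "SOUTH", "EAST", "WEST"] : List String))
    (hjun : ∀ t d, s.head? = some t → l.head? = some d → pvOpp.get? t ≠ some d) :
    l.foldl pvStep s = l.reverse ++ s := by
  induction l generalizing s with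
  | nil => simp
  | cons d rest ih =>
      have hstep : pvStep s d = d :: s := by
        unfold pvStep
        split
        · rename_i hcond
          cases s with
          | nil => simp at hcond
          | cons t s' =>
              exfalso
              have ht : t = pvOpp.getD d "" := by simpa using hcond
              have hvd := pvOpp_valid d (hl d (by simp))
              have htd : pvOpp.get? t = some d := by
                subst ht; exact pvOpp_invol d _ hvd
              exact hjun t d rfl rfl htd
        · rfl
      simp only [List.foldl_cons, hstep]
      have hIrr' : pvIrred rest := List.IsChain.tail hirr
      have hl' : ∀ e ∈ rest, e ∈ (["NORTH", "SOUTH", "EAST", "WEST"] : List String) :=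
        fun e he => hl e (List.mem_cons_of_mem d he)
      have hjun' : ∀ t e, (d :: s).head? = some t → rest.head? = some e →
          pvOpp.get? t ≠ some e := by
        intro t e ht he
        have ht' : t = d := (by simpa using ht : d = t).symm
        subst ht'
        cases rest with
        | nil => simp at he
        | cons r rs =>
            have he' : e = r := (by simpa using he : r = e).symm
            subst he'
            exact List.rel_of_isChain_cons_cons (R := fun a b => pvOpp.get? a ≠ some b) hirr
      rw [ih (d :: s) hIrr' hl' hjun']
      simp

theorem pvRF_none_irred (l : List String) (h : pvRF l = none) : pvIrred l := by
  induction l with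
  | nil => exact List.IsChain.nil
  | cons a rest ih =>
      cases rest with
      | nil => exact List.isChain_singleton _
      | cons b rest' =>
          simp only [pvRF] at h
          split at h
          · cases h
          · rename_i hne
            have h' : pvRF (b :: rest') = none := by
              cases hrb : pvRF (b :: rest') with
              | none => rfl
              | some c => rw [hrb] at h; simp at h
            exact List.isChain_cons_cons.mpr ⟨hne, ih h'⟩

theorem pvRF_some (l c : List String) (h : pvRF l = some c) :
    ∃ x a b y, l = x ++ a :: b :: y ∧ c = x ++ y ∧ pvOpp.get? a = some b := by
  induction l generalizing c with
  | nil => simp [pvRF] at h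
  | cons a rest ih =>
      cases rest with
      | nil => simp [pvRF] at h
      | cons b rest' =>
          simp only [pvRF] at h
          split at h
          · rename_i hab
            exact ⟨[], a, b, rest', by simp, by simpa using h.symm, hab⟩
          · rcases Option.map_eq_some_iff.mp h with ⟨c', hc', rfl⟩
            rcases ih c' hc' with ⟨x, a', b', y, hsplit, hc, hab⟩
            exact ⟨a :: x, a', b', y, by simp [hsplit], by simp [hc], hab⟩

theorem pvMainAux (n : Nat) : ∀ l : List String, l.length ≤ n →
    (∀ d ∈ l, d ∈ (["NORTH", "SOUTH", "EAST", "WEST"] : List String)) →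
    ((l.foldl pvStep ["dummy"]).reverse).tail = pvFix l := by
  induction n with
  | zero =>
      intro l hlen _
      have : l = [] := List.length_eq_zero_iff.mp (Nat.le_zero.mp hlen)
      subst this
      rw [pvFix]
      rfl
  | succ n ih =>
      intro l hlen hval
      cases h : pvRF l with
      | none =>
          have halt : pvFix l = l := by rw [pvFix, h]
          rw [halt]
          have hjun : ∀ t d, (["dummy"] : List String).head? = some t → l.head? = some d →
              pvOpp.get? t ≠ some d := by
            intro t d ht _ hc
            have : t = "dummy" := (by simpa using ht : "dummy" = t).symm
            subst this
            rcases pvOpp_get?_char "dummy" d hc with ⟨h1, _⟩ | ⟨h1, _⟩ | ⟨h1, _⟩ | ⟨h1, _⟩ <;>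
              exact absurd h1 (by decide)
          rw [pvIrredRun l ["dummy"] (pvRF_none_irred l h) hval hjun]
          simp
      | some c =>
          have halt : pvFix l = pvFix c := by rw [pvFix, h]
          rcases pvRF_some l c h with ⟨x, a, b, y, rfl, rfl, hab⟩
          have hxval : ∀ d ∈ x, d ∈ (["NORTH", "SOUTH", "EAST", "WEST"] : List String) :=
            fun d hd => hval d (by simp [hd])
          have hinv : pvInv (x.foldl pvStep ["dummy"]) :=
            pvInv_preserved x ["dummy"] (List.isChain_singleton _) hxval
          have hfold : (x ++ a :: b :: y).foldl pvStep ["dummy"]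
              = (x ++ y).foldl pvStep ["dummy"] := by
            rw [List.foldl_append, List.foldl_append]
            exact pvCancel y _ a b hinv hab
          rw [halt, hfold]
          refine ih (x ++ y) ?_ ?_
          · have := pvRF_length _ _ h
            simp only [List.length_append] at this ⊢
            simp only [List.length_append, List.length_cons] at hlen
            omega
          · intro d hd
            rcases List.mem_append.mp hd with h' | h'
            · exact hval d (by simp [h'])
            · exact hval d (by simp [h'])

theorem pvMain (l : List String)
    (hl : ∀ d ∈ l, d ∈ (["NORTH", "SOUTH", "EAST", "WEST"] : List String)) :
    ((l.foldl pvStep ["dummy"]).reverse).tail = pvFix l :=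
  pvMainAux l.length l le_rfl hl


theorem pvRemoveFirst_map (l : List String)
    (hl : ∀ d ∈ l, d ∈ (["NORTH", "SOUTH", "EAST", "WEST"] : List String)) :
    pvRemoveFirst l (l.map (fun d => pvOpp.getD d ""))
      = (pvRF l).map (fun c => (c, c.map (fun d => pvOpp.getD d ""))) := by
  induction l with
  | nil => simp [pvRemoveFirst, pvRF]
  | cons a rest ih =>
      cases rest with
      | nil => simp [pvRemoveFirst, pvRF]
      | cons b cs =>
          simp only [List.map_cons]
          simp only [pvRemoveFirst, pvRF]
          have ha := hl a (by simp)
          have hcond : (pvOpp.getD a "" = b) ↔ (pvOpp.get? a = some b) := by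
            constructor
            · intro h; rw [← h]; exact pvOpp_valid a ha
            · intro h; exact pvOpp_getD a b h
          by_cases hc : pvOpp.get? a = some b
          · rw [if_pos (hcond.mpr hc), if_pos hc]
            simp
          · rw [if_neg (fun hh => hc (hcond.mp hh)), if_neg hc]
            simp only [List.map_cons] at ih
            rw [ih (fun e he => hl e (List.mem_cons_of_mem a he))]
            cases pvRF (b :: cs) with
            | none => simp
            | some c => simp

theorem pvLoopFixAux (n : Nat) : ∀ l : List String, l.length ≤ n →
    (∀ d ∈ l, d ∈ (["NORTH", "SOUTH", "EAST", "WEST"] : List String)) →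
    pvLoop l (l.map (fun d => pvOpp.getD d "")) = pvFix l := by
  induction n with
  | zero =>
      intro l hlen _
      have : l = [] := List.length_eq_zero_iff.mp (Nat.le_zero.mp hlen)
      subst this
      rw [pvLoop, pvFix]
      simp [pvRemoveFirst, pvRF]
  | succ n ih =>
      intro l hlen hval
      cases h : pvRF l with
      | none =>
          have hm : pvRemoveFirst l (l.map (fun d => pvOpp.getD d "")) = none := by
            rw [pvRemoveFirst_map l hval, h]; rfl
          rw [pvLoop, hm, pvFix, h]
      | some c =>
          have hm : pvRemoveFirst l (l.map (fun d => pvOpp.getD d ""))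
              = some (c, c.map (fun d => pvOpp.getD d "")) := by
            rw [pvRemoveFirst_map l hval, h]; rfl
          have hcval : ∀ d ∈ c, d ∈ (["NORTH", "SOUTH", "EAST", "WEST"] : List String) := by
            rcases pvRF_some l c h with ⟨x, a, b, y, rfl, rfl, _⟩
            intro d hd
            rcases List.mem_append.mp hd with h' | h'
            · exact hval d (by simp [h'])
            · exact hval d (by simp [h'])
          have hlen' : c.length ≤ n := by
            have := pvRF_length l c h
            omega
          have hfix : pvFix l = pvFix c := by rw [pvFix, h]
          rw [pvLoop, hm, hfix]
          exact ih c hlen' hcval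

theorem pvLoopFix (l : List String)
    (hl : ∀ d ∈ l, d ∈ (["NORTH", "SOUTH", "EAST", "WEST"] : List String)) :
    pvLoop l (l.map (fun d => pvOpp.getD d "")) = pvFix l :=
  pvLoopFixAux l.length l le_rfl hl

-- ===== VERDICT (by name: the statement is the Claim_ definition above) =====
theorem dirReduc_spec : Claim_equal_dirReduc := by
  intro plan _ hpre
  unfold Spec_dirReduc dirReduc dirReduc_alt
  rw [pvBridge, PySem.List.slice_from_one, pvLoopFix plan hpre]
  exact pvMain plan hpre
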